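-- pv_equiv track=rewrite | github.com/Haksell/codeforces | problems/1715B.py | solve
-- ===== SOURCE A (Python) =====
-- def solve(n, k, b, s):
--     rem = s - k * b
--     if 0 <= rem <= n * (k - 1):
--         res = [0] * n
--         res[0] = k * b
--         for i in range(n):
--             res[i] += min(rem, k - 1)
--             rem -= k - 1
--             if rem <= 0:
--                 break
--         return res
--     else:
--         return [-1]
-- ===== SOURCE B (Python) =====
-- def solve(n, k, b, s):
--     rem = s - k * b
--     if not (0 <= rem <= n * (k - 1)):
--         return [-1]
--     res = [0] * n
--     if k > 1:
--         q, r = divmod(rem, k - 1)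
--         res[:q] = [k - 1] * q
--         if r:
--             res[q] = r
--     res[0] += k * b
--     return res
-- ===== Notes on version B (the rewrite author's own statement) =====
-- stated objective: simpler
-- what changed: Replaces A's per-slot distribution loop (walking up to n slots, adding min(rem,k-1) and re-checking the break condition each step) with a single divmod: q full slots are set by one slice assignment and the remainder lands on slot q.
import Mathlib
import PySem

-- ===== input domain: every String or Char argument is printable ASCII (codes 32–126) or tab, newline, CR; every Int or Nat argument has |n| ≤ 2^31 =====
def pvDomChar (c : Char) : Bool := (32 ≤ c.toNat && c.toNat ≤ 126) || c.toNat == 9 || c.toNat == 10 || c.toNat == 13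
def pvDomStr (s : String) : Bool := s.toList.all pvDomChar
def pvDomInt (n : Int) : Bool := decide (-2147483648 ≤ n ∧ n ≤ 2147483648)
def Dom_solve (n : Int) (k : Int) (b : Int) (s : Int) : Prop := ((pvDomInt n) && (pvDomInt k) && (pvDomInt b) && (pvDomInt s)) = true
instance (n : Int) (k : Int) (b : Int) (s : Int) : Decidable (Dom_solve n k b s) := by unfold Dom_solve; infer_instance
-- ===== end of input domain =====

-- B replaces A's per-slot distribution loop by one divmod and a slice fill (simpler: no loop, one divmod).

-- ===== PORT A =====
-- the 'for i in range(n)' loop with its break: structural recursion over the index list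
def solveLoopA (k : Int) : List Nat → List Int → Int → List Int
  | [], res, _ => res
  | i :: is, res, rem =>
    let res' := res.set i (res.getD i 0 + min rem (k - 1))
    let rem' := rem - (k - 1)
    if rem' ≤ 0 then res' else solveLoopA k is res' rem'

def solve (n : Int) (k : Int) (b : Int) (s : Int) : List Int :=
  let rem := s - k * b
  if 0 ≤ rem ∧ rem ≤ n * (k - 1) then
    let res := (List.replicate n.toNat (0 : Int)).set 0 (k * b)
    solveLoopA k (List.range n.toNat) res rem
  else [-1]

-- ===== PORT B =====
def solve_alt (n : Int) (k : Int) (b : Int) (s : Int) : List Int :=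
  let rem := s - k * b
  if ¬ (0 ≤ rem ∧ rem ≤ n * (k - 1)) then [-1]
  else
    let res := List.replicate n.toNat (0 : Int)
    let res :=
      if k > 1 then
        let q := PySem.Int.floordiv rem (k - 1)
        let r := PySem.Int.mod rem (k - 1)
        let res := List.replicate q.toNat (k - 1) ++ res.drop q.toNat
        if r ≠ 0 then res.set q.toNat r else res
      else res
    res.set 0 (res.getD 0 0 + k * b)

-- ===== PRECONDITION & SPEC =====
-- Pre_ excludes inputs where the guard holds but n ≤ 0: there A's res[0] assignment raises IndexError (and B raises too).
def Pre_solve (n : Int) (k : Int) (b : Int) (s : Int) : Prop :=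
  (0 ≤ s - k * b ∧ s - k * b ≤ n * (k - 1)) → 1 ≤ n
instance (n : Int) (k : Int) (b : Int) (s : Int) : Decidable (Pre_solve n k b s) := by unfold Pre_solve; infer_instance

def pvWitness_solve : Int × Int × Int × Int := (2, 10, 1, 15)

def Spec_solve (n : Int) (k : Int) (b : Int) (s : Int) (out : List Int) : Prop := out = solve_alt n k b s
instance (n : Int) (k : Int) (b : Int) (s : Int) (out : List Int) : Decidable (Spec_solve n k b s out) := by unfold Spec_solve; infer_instance

-- ===== CLAIM (what is proved, stated in full; the proofs are below) =====
def Claim_equal_solve : Prop := ∀ (n : Int) (k : Int) (b : Int) (s : Int), Dom_solve n k b s → Pre_solve n k b s → Spec_solve n k b s (solve n k b s)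

-- ===== LEMMAS AND PROOFS =====

-- getD-level characterisations of the list operations used by the two ports
lemma getD_set (l : List Int) (i j : Nat) (x : Int) :
    (l.set i x).getD j 0 = if j = i ∧ j < l.length then x else l.getD j 0 := by
  simp only [List.getD_eq_getElem?_getD, List.getElem?_set]
  split_ifs with h1 h2 h3 <;> simp_all <;> omega

lemma getD_replicate (n : Nat) (x : Int) (i : Nat) :
    (List.replicate n x).getD i 0 = if i < n then x else 0 := by
  simp only [List.getD_eq_getElem?_getD, List.getElem?_replicate]
  split_ifs <;> simp

lemma getD_append (l₁ l₂ : List Int) (i : Nat) :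
    (l₁ ++ l₂).getD i 0 = if i < l₁.length then l₁.getD i 0 else l₂.getD (i - l₁.length) 0 := by
  simp only [List.getD_eq_getElem?_getD, List.getElem?_append]
  split_ifs <;> rfl

lemma getD_drop (l : List Int) (m i : Nat) :
    (l.drop m).getD i 0 = l.getD (m + i) 0 := by
  simp [List.getD_eq_getElem?_getD, List.getElem?_drop]

lemma ext_getD (l₁ l₂ : List Int) (hlen : l₁.length = l₂.length)
    (h : ∀ i, l₁.getD i 0 = l₂.getD i 0) : l₁ = l₂ := by
  apply List.ext_getElem hlen
  intro i h1 h2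
  have := h i
  simpa [List.getD_eq_getElem?_getD, List.getElem?_eq_getElem, h1, h2] using this

-- the fill fold describing the first q iterations of A's loop
def fillC (c : Int) (j q : Nat) (res : List Int) : List Int :=
  (List.range' j q).foldl (fun a i => a.set i (a.getD i 0 + c)) res

lemma fillC_succ (c : Int) (j q : Nat) (res : List Int) :
    fillC c j (q + 1) res = fillC c (j + 1) q (res.set j (res.getD j 0 + c)) := by
  simp [fillC, List.range'_succ]

lemma len_fillC (c : Int) : ∀ (q j : Nat) (res : List Int), (fillC c j q res).length = res.length := by
  intro q
  induction q with
  | zero => intro j res; rfl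
  | succ q ih => intro j res; rw [fillC_succ, ih]; simp

lemma getD_fillC (c : Int) : ∀ (q j : Nat) (res : List Int) (i : Nat),
    (fillC c j q res).getD i 0 =
      if j ≤ i ∧ i < j + q ∧ i < res.length then res.getD i 0 + c else res.getD i 0 := by
  intro q
  induction q with
  | zero => intro j res i; simp [fillC]; omega
  | succ q ih =>
    intro j res i
    rw [fillC_succ, ih, getD_set]
    simp only [List.length_set]
    split_ifs <;> simp_all <;> omega

-- A's loop, when rem = q*(k-1) + r with 0 < r ≤ k-1, adds k-1 to q slots and r to slot j+q
lemma loopA_eq (k : Int) (r : Int) (hr0 : 0 < r) (hrc : r ≤ k - 1) :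
    ∀ (q : Nat) (j len : Nat) (res : List Int), q < len →
    solveLoopA k (List.range' j len) res ((q : Int) * (k - 1) + r) =
      (fillC (k - 1) j q res).set (j + q) ((fillC (k - 1) j q res).getD (j + q) 0 + r) := by
  intro q
  induction q with
  | zero =>
    intro j len res hlen
    cases len with
    | zero => omega
    | succ m =>
      rw [List.range'_succ]
      simp only [solveLoopA, Nat.cast_zero, zero_mul, zero_add]
      rw [min_eq_left hrc, if_pos (by omega : r - (k-1) ≤ 0)]
      simp [fillC]
  | succ q ih =>
    intro j len res hlen
    cases len with
    | zero => omega
    | succ m =>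
      have hc : 0 < k - 1 := lt_of_lt_of_le hr0 hrc
      rw [List.range'_succ]
      simp only [solveLoopA]
      have hmin : min ((↑(q+1) : Int) * (k - 1) + r) (k - 1) = k - 1 := by
        apply min_eq_right; push_cast; nlinarith
      have hrem : (↑(q+1) : Int) * (k - 1) + r - (k - 1) = (q : Int) * (k - 1) + r := by
        push_cast; ring
      rw [hmin, hrem, if_neg (by nlinarith : ¬ ((q:Int) * (k-1) + r ≤ 0))]
      rw [ih (j+1) m _ (by omega)]
      rw [fillC_succ]
      have : j + (q + 1) = (j + 1) + q := by omega
      rw [this]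

-- ===== VERDICT (by name: the statement is the Claim_ definition above) =====
set_option maxHeartbeats 1600000 in
theorem solve_spec : Claim_equal_solve := by
  intro n k b s hdom hpre
  unfold Spec_solve
  by_cases hg : 0 ≤ s - k * b ∧ s - k * b ≤ n * (k - 1)
  · have hn : 1 ≤ n := hpre hg
    have hN : 1 ≤ n.toNat := by omega
    simp only [solve, solve_alt, if_pos hg, if_neg (not_not_intro hg)]
    obtain ⟨hg1, hg2⟩ := hg
    rcases eq_or_lt_of_le hg1 with hz | hpos
    · -- rem = 0 : one loop iteration in A, empty fill in B
      have hk : 0 ≤ k - 1 := by by_contra hkn; push_neg at hkn; nlinarith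
      have hA : solveLoopA k (List.range n.toNat) ((List.replicate n.toNat (0:Int)).set 0 (k*b)) (s - k*b) =
          ((List.replicate n.toNat (0:Int)).set 0 (k*b)).set 0
            ((((List.replicate n.toNat (0:Int)).set 0 (k*b)).getD 0 0) + 0) := by
        obtain ⟨m, hm⟩ : ∃ m, n.toNat = m + 1 := ⟨n.toNat - 1, by omega⟩
        rw [List.range_eq_range', hm, List.range'_succ]
        simp only [solveLoopA, ← hz]
        rw [min_eq_left hk, if_pos (by omega : (0:Int) - (k-1) ≤ 0)]
      rw [hA]
      have hB : (if k > 1 then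
            (if PySem.Int.mod (s - k*b) (k-1) ≠ 0 then
              (List.replicate (PySem.Int.floordiv (s - k*b) (k-1)).toNat (k-1) ++
                (List.replicate n.toNat (0:Int)).drop (PySem.Int.floordiv (s - k*b) (k-1)).toNat).set
                (PySem.Int.floordiv (s - k*b) (k-1)).toNat (PySem.Int.mod (s - k*b) (k-1))
            else
              List.replicate (PySem.Int.floordiv (s - k*b) (k-1)).toNat (k-1) ++
                (List.replicate n.toNat (0:Int)).drop (PySem.Int.floordiv (s - k*b) (k-1)).toNat)
          else List.replicate n.toNat (0:Int)) = List.replicate n.toNat (0:Int) := by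
        by_cases hk1 : k > 1
        · rw [if_pos hk1]
          rw [show PySem.Int.floordiv (s - k*b) (k-1) = 0 by
               rw [← hz, PySem.Int.floordiv_eq_ediv_of_pos (by omega)]; simp]
          rw [show PySem.Int.mod (s - k*b) (k-1) = 0 by
               rw [← hz, PySem.Int.mod_eq_emod_of_pos (by omega)]; simp]
          simp
        · rw [if_neg hk1]
      rw [hB]
      apply ext_getD
      · simp
      · intro i
        simp only [getD_set, getD_replicate, List.length_set, List.length_replicate]
        split_ifs <;> first | rfl | ring1 | omega | (exfalso; (try simp only [true_and, and_true] at *); omega)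
    · -- rem > 0 : k ≥ 2 forced; A's loop matches the divmod fill
      have hc : 0 < k - 1 := by by_contra hkn; push_neg at hkn; nlinarith
      have hk1 : k > 1 := by omega
      rw [if_pos hk1]
      set qP := PySem.Int.floordiv (s - k * b) (k - 1) with hqPdef
      set rP := PySem.Int.mod (s - k * b) (k - 1) with hrPdef
      have hr0 : 0 ≤ rP := PySem.Int.mod_nonneg _ hc
      have hrlt : rP < k - 1 := PySem.Int.mod_lt _ hc
      have hsum : qP * (k - 1) + rP = s - k * b := PySem.Int.floordiv_mul_add_mod _ _
      have hq0 : 0 ≤ qP := by nlinarith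
      have hNn : (n.toNat : Int) = n := by omega
      by_cases hrp : rP = 0
      · -- remainder zero: q ≥ 1 full slots, nothing extra
        rw [if_neg (by simp [hrp])]
        have hq1 : 1 ≤ qP := by nlinarith
        have hqn : qP ≤ n := by nlinarith
        have hq1' : ((qP.toNat - 1 : Nat) : Int) = qP - 1 := by omega
        have hcast : s - k * b = ((qP.toNat - 1 : Nat) : Int) * (k - 1) + (k - 1) := by
          rw [hq1', ← hsum, hrp]; ring
        rw [List.range_eq_range', hcast,
            loopA_eq k (k-1) hc le_rfl (qP.toNat - 1) 0 n.toNat _ (by omega)]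
        apply ext_getD
        · simp [len_fillC]; omega
        · intro i
          simp only [getD_set, getD_fillC, getD_append, getD_drop, getD_replicate,
            List.length_set, List.length_replicate, len_fillC, List.length_append,
            List.length_drop]
          split_ifs <;> first | rfl | ring1 | omega | (exfalso; (try simp only [true_and, and_true] at *); omega)
      · -- positive remainder lands on slot q
        rw [if_pos hrp]
        have hrp0 : 0 < rP := lt_of_le_of_ne hr0 (Ne.symm hrp)
        have hqn : qP < n := by nlinarith
        have hcast : s - k * b = ((qP.toNat : Nat) : Int) * (k - 1) + rP := by
          rw [Int.toNat_of_nonneg hq0, hsum]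
        rw [List.range_eq_range', hcast,
            loopA_eq k rP hrp0 (le_of_lt hrlt) qP.toNat 0 n.toNat _ (by omega)]
        apply ext_getD
        · simp [len_fillC]; omega
        · intro i
          simp only [getD_set, getD_fillC, getD_append, getD_drop, getD_replicate,
            List.length_set, List.length_replicate, len_fillC, List.length_append,
            List.length_drop]
          split_ifs <;> first | rfl | ring1 | omega | (exfalso; (try simp only [true_and, and_true] at *); omega)
  · simp only [solve, solve_alt, if_neg hg, if_pos hg]
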